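-- pv_equiv track=rewrite | github.com/thomasnormal/circt | utils/mutation_mcy/lib/native_mutation_plan.py | count_literal_token
-- ===== SOURCE A (Python) =====
-- def is_code_span(mask: list[bool], start: int, end: int) -> bool:
--     if start < 0 or end > len(mask) or start >= end:
--         return False
--     return all(mask[i] for i in range(start, end))
--
-- def count_literal_token(text: str, token: str, mask: list[bool]) -> int:
--     if not token:
--         return 0
--     pos = 0
--     count = 0
--     while True:
--         pos = text.find(token, pos)
--         if pos < 0:
--             return count
--         if is_code_span(mask, pos, pos + len(token)):
--             count += 1
--         pos += len(token)
-- ===== SOURCE B (Python) =====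
-- def count_literal_token(text: str, token: str, mask: list[bool]) -> int:
--     if not token:
--         return 0
--     k = len(token)
--     prefix = [0]
--     acc = 0
--     for b in mask:
--         acc += 1 if b else 0
--         prefix.append(acc)
--     count = 0
--     i = 0
--     n = len(text)
--     while i + k <= n:
--         if text.startswith(token, i):
--             if i + k <= len(mask) and prefix[i + k] - prefix[i] == k:
--                 count += 1
--             i += k
--         else:
--             i += 1
--     return count
-- ===== Notes on version B (the rewrite author's own statement) =====
-- stated objective: alternative
-- what changed: Replaces A's find()-and-skip loop plus a per-match all(mask[i] for i in range(...)) span check by a single left-to-right index scan using startswith together with a prefix-sum array over mask, so each candidate match is tested for lying in code with one O(1) subtraction instead of an O(k) rescan of the mask.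
import Mathlib
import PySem

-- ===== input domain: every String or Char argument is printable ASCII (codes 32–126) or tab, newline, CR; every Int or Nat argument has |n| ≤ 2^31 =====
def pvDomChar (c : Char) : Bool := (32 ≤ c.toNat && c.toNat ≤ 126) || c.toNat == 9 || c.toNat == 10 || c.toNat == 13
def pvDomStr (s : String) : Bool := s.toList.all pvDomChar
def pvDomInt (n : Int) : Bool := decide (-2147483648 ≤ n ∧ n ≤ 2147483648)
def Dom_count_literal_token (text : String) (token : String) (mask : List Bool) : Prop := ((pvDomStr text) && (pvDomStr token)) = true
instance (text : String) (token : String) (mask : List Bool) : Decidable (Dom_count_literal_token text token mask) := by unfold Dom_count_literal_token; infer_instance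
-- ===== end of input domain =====

-- B replaces A's find-and-skip loop with a per-match all() span check by a left-to-right
-- index scan using startswith and an O(1) prefix-sum test over mask (objective: alternative).

-- ===== PORT A =====
def is_code_span (mask : List Bool) (start : Int) (stop : Int) : Bool :=
  if start < 0 || (mask.length : Int) < stop || stop ≤ start then false
  else (PySem.List.pyRange start stop 1).all (fun i => PySem.List.pyGetD mask i false)

-- the 'while True' loop; fuel (text.length + 1) is a totality guard only: pos strictly
-- increases at every iteration and stays ≤ text.length, so the fuel is never exhausted
def countLoopA (text : List Char) (token : List Char) (mask : List Bool) :
    Nat → Int → Int → Int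
  | 0, _, count => count
  | fuel+1, pos, count =>
    let p := PySem.Chars.findFrom text token pos none
    if p < 0 then count
    else countLoopA text token mask fuel (p + (token.length : Int))
      (if is_code_span mask p (p + (token.length : Int)) then count + 1 else count)

def count_literal_token (text : String) (token : String) (mask : List Bool) : Int :=
  if token.toList = [] then 0
  else countLoopA text.toList token.toList mask (text.toList.length + 1) 0 0

-- ===== PORT B =====
def prefixSums (mask : List Bool) : List Int :=
  (mask.foldl (fun (st : List Int × Int) b =>
      let acc := st.2 + (if b then 1 else 0)
      (st.1 ++ [acc], acc)) ([0], 0)).1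

def countLoopB (text : List Char) (c : Char) (cs : List Char) (mask : List Bool)
    (pref : List Int) (i : Nat) (count : Int) : Int :=
  let k := cs.length + 1
  if i + k ≤ text.length then
    if (c :: cs).isPrefixOf (text.drop i) then
      countLoopB text c cs mask pref (i + k)
        (if i + k ≤ mask.length ∧ pref.getD (i + k) 0 - pref.getD i 0 = (k : Int)
         then count + 1 else count)
    else countLoopB text c cs mask pref (i + 1) count
  else count
termination_by text.length - i
decreasing_by all_goals omega

def count_literal_token_alt (text : String) (token : String) (mask : List Bool) : Int :=
  match token.toList with
  | [] => 0
  | c :: cs => countLoopB text.toList c cs mask (prefixSums mask) 0 0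

-- ===== PRECONDITION & SPEC =====
def Spec_count_literal_token (text : String) (token : String) (mask : List Bool) (out : Int) : Prop := out = count_literal_token_alt text token mask
instance (text : String) (token : String) (mask : List Bool) (out : Int) : Decidable (Spec_count_literal_token text token mask out) := by unfold Spec_count_literal_token; infer_instance

-- ===== CLAIM (what is proved, stated in full; the proofs are below) =====
def Claim_equal_count_literal_token : Prop := ∀ (text : String) (token : String) (mask : List Bool), Dom_count_literal_token text token mask → Spec_count_literal_token text token mask (count_literal_token text token mask)

-- ===== LEMMAS AND PROOFS =====

-- the prefix list B builds, characterised position by position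
lemma prefixSums_foldl (m : List Bool) : ∀ (ps : List Int) (acc : Int),
    (m.foldl (fun (st : List Int × Int) b =>
      let a := st.2 + (if b then 1 else 0)
      (st.1 ++ [a], a)) (ps, acc)).1
    = ps ++ (List.range m.length).map
        (fun j => acc + ((m.take (j+1)).countP id : Int)) := by
  induction m with
  | nil => simp
  | cons b t ih =>
      intro ps acc
      simp only [List.foldl_cons, ih]
      rw [List.length_cons, List.range_succ_eq_map]
      simp only [List.map_cons, List.map_map]
      simp [List.append_assoc, Function.comp]
      intro a _
      cases b <;> simp [id] <;> ring

lemma prefixSums_eq (mask : List Bool) :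
    prefixSums mask = (List.range (mask.length + 1)).map
      (fun j => ((mask.take j).countP id : Int)) := by
  rw [prefixSums, prefixSums_foldl, List.range_succ_eq_map]
  simp [List.map_map, Function.comp]

lemma prefixSums_getD (mask : List Bool) (j : Nat) (h : j ≤ mask.length) :
    (prefixSums mask).getD j 0 = ((mask.take j).countP id : Int) := by
  rw [prefixSums_eq]
  exact PySem.List.getD_map_range _ _ _ _ (by omega)

-- A's all(mask[i] for i in range(p, p+k)) over indices, as a statement about elements
lemma pyRange_all_iff (mask : List Bool) (p k : Nat) (h : p + k ≤ mask.length) :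
    ((PySem.List.pyRange (p:Int) ((p:Int)+(k:Int)) 1).all
       (fun i => PySem.List.pyGetD mask i false) = true)
    ↔ ∀ j, (hj : j < k) → mask[p+j]'(by omega) = true := by
  rw [List.all_eq_true]
  constructor
  · intro H j hj
    have hx := H ((p:Int)+(j:Int)) (by rw [PySem.List.mem_pyRange_one]; omega)
    rw [PySem.List.pyGetD_eq_getElem mask false (by omega) (by omega)] at hx
    have ht : ((p:Int)+(j:Int)).toNat = p + j := by omega
    simp only [ht] at hx
    exact hx
  · intro H x hx
    rw [PySem.List.mem_pyRange_one] at hx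
    rw [PySem.List.pyGetD_eq_getElem mask false (by omega) (by omega)]
    simpa [show p + (x.toNat - p) = x.toNat by omega] using H (x.toNat - p) (by omega)

-- B's 'k true values in mask[p:p+k]' over the segment, as the same statement
lemma seg_count_iff (mask : List Bool) (p k : Nat) (h : p + k ≤ mask.length) :
    (((mask.drop p).take k).countP id = k)
    ↔ ∀ j, (hj : j < k) → mask[p+j]'(by omega) = true := by
  have hlen : ((mask.drop p).take k).length = k := by
    simp [List.length_take, List.length_drop]; omega
  constructor
  · intro H j hj
    have hall := (List.countP_eq_length (p := id)).mp (by rw [hlen]; exact H)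
    have hmem : ((mask.drop p).take k)[j]'(by omega) ∈ (mask.drop p).take k := List.getElem_mem _
    have := hall _ hmem
    simpa [List.getElem_take, List.getElem_drop] using this
  · intro H
    have hc : ((mask.drop p).take k).countP id = ((mask.drop p).take k).length := by
      rw [List.countP_eq_length]
      intro a ha
      rw [List.mem_iff_getElem] at ha
      obtain ⟨j, hj, rfl⟩ := ha
      rw [hlen] at hj
      simpa [List.getElem_take, List.getElem_drop] using H j hj
    omega

-- A's span check equals B's prefix-sum condition
lemma span_cond (mask : List Bool) (p k : Nat) (hk : 1 ≤ k) :
    (is_code_span mask (p : Int) ((p : Int) + (k : Int)) = true)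
    ↔ (p + k ≤ mask.length ∧
       (prefixSums mask).getD (p + k) 0 - (prefixSums mask).getD p 0 = (k : Int)) := by
  unfold is_code_span
  split_ifs with hg
  · simp only [false_iff]
    simp only [Bool.or_eq_true, decide_eq_true_eq] at hg
    rintro ⟨h1, -⟩
    omega
  · simp only [Bool.or_eq_true, decide_eq_true_eq, not_or] at hg
    have hlen : p + k ≤ mask.length := by omega
    have hdiff : (prefixSums mask).getD (p + k) 0 - (prefixSums mask).getD p 0
        = (((mask.drop p).take k).countP id : Int) := by
      rw [prefixSums_getD _ _ hlen, prefixSums_getD _ _ (by omega), List.take_add,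
        List.countP_append]
      push_cast; ring
    rw [pyRange_all_iff mask p k hlen, hdiff]
    constructor
    · intro H
      exact ⟨hlen, by
        exact_mod_cast congrArg (Nat.cast (R := Int)) ((seg_count_iff mask p k hlen).mpr H)⟩
    · rintro ⟨-, H⟩
      exact (seg_count_iff mask p k hlen).mp (by exact_mod_cast H)

lemma infix_drop_succ {text sub : List Char} {i : Nat} (h : sub <:+: text.drop (i+1)) :
    sub <:+: text.drop i := by
  have h1 : text.drop (i+1) = List.drop 1 (text.drop i) := by
    rw [List.drop_drop]
  exact h.trans (by rw [h1]; exact (List.drop_suffix 1 (text.drop i)).isInfix)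

-- if the token occurs nowhere at or after i, B's scan reaches the end without counting
lemma loopB_no_match (text : List Char) (c : Char) (cs : List Char) (mask : List Bool)
    (pref : List Int) :
    ∀ d i count, text.length - i < d → ¬ (c :: cs) <:+: text.drop i →
      countLoopB text c cs mask pref i count = count := by
  intro d
  induction d with
  | zero => intro i count h _; omega
  | succ d ih =>
    intro i count hd hno
    rw [countLoopB]
    by_cases h1 : i + (cs.length + 1) ≤ text.length
    · rw [if_pos h1,
        if_neg (fun hp => hno (List.isPrefixOf_iff_prefix.mp hp).isInfix)]
      exact ih (i+1) count (by omega) (fun hin => hno (infix_drop_succ hin))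
    · rw [if_neg h1]

-- B's scan walks silently across a match-free stretch up to the next occurrence
lemma loopB_walk (text : List Char) (c : Char) (cs : List Char) (mask : List Bool)
    (pref : List Int) :
    ∀ m i count, (c :: cs) <+: text.drop (i + m) →
      (∀ j, i ≤ j → j < i + m → ¬ (c :: cs) <+: text.drop j) →
      countLoopB text c cs mask pref i count = countLoopB text c cs mask pref (i + m) count := by
  intro m
  induction m with
  | zero => intro i count _ _; rfl
  | succ m ih =>
    intro i count hpre hno
    have hlenpre := hpre.length_le
    simp only [List.length_drop, List.length_cons] at hlenpre
    have hguard : i + (cs.length + 1) ≤ text.length := by omega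
    rw [countLoopB]
    rw [if_pos hguard, if_neg (by
      intro hp
      exact hno i (le_refl i) (by omega) (List.isPrefixOf_iff_prefix.mp hp))]
    have heq : (i + 1) + m = i + (m + 1) := by omega
    rw [ih (i+1) count (by rw [heq]; exact hpre)
      (fun j hj1 hj2 => hno j (by omega) (by omega)), heq]

-- the two loops agree from any position i on
lemma loop_main (text : List Char) (c : Char) (cs : List Char) (mask : List Bool) :
    ∀ fuel i count, i ≤ text.length → text.length + 1 - i ≤ fuel →
      countLoopA text (c :: cs) mask fuel (i : Int) count
      = countLoopB text c cs mask (prefixSums mask) i count := by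
  intro fuel
  induction fuel with
  | zero => intro i count h1 h2; omega
  | succ fuel ih =>
    intro i count hi hfuel
    rw [countLoopA]
    have hff := PySem.Chars.findFrom_natCast text (c :: cs) i hi
    by_cases hneg : PySem.Chars.find (text.drop i) (c :: cs) = -1
    · simp only [hff, if_pos hneg]
      rw [if_pos (by norm_num)]
      exact (loopB_no_match text c cs mask _ (text.length - i + 1) i count (by omega)
        ((PySem.Chars.find_eq_neg_one_iff _ _).mp hneg)).symm
    · set f := PySem.Chars.find (text.drop i) (c :: cs) with hfdef
      have hf0 : 0 ≤ f := by
        have := PySem.Chars.neg_one_le_find (text.drop i) (c :: cs)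
        omega
      set m := f.toNat with hmdef
      have hspec := PySem.Chars.find_spec (s := text.drop i) (sub := c :: cs) hf0
      have hdd : List.drop m (List.drop i text) = List.drop (i + m) text := by
        rw [List.drop_drop, Nat.add_comm]
      have hpre : (c :: cs) <+: text.drop (i + m) := by rw [← hdd]; exact hspec.1
      have hlenpre := hpre.length_le
      simp only [List.length_drop, List.length_cons] at hlenpre
      have hik : i + m + (cs.length + 1) ≤ text.length := by omega
      simp only [hff, if_neg hneg]
      rw [if_neg (by omega : ¬ ((i:Int) + f < 0))]
      have e1 : (i:Int) + f + (((c :: cs).length : Nat) : Int)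
          = ((i + m + (cs.length + 1) : Nat) : Int) := by
        simp only [List.length_cons]
        omega
      have e2 : (i:Int) + f = ((i + m : Nat) : Int) := by omega
      rw [loopB_walk text c cs mask _ m i count hpre (by
        intro j hj1 hj2 hpj
        have hmin := hspec.2 (j - i) (by omega)
        have hdj : List.drop (j - i) (List.drop i text) = List.drop j text := by
          rw [List.drop_drop]; congr 1; omega
        rw [hdj] at hmin
        exact hmin hpj)]
      rw [countLoopB]
      rw [if_pos hik, if_pos (List.isPrefixOf_iff_prefix.mpr hpre)]
      rw [e1, e2]
      have hspan := span_cond mask (i + m) (cs.length + 1) (by omega)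
      rw [show ((i + m : Nat) : Int) + ((cs.length + 1 : Nat) : Int)
          = ((i + m + (cs.length + 1) : Nat) : Int) by push_cast; ring] at hspan
      by_cases hc : i + m + (cs.length + 1) ≤ mask.length ∧
          (prefixSums mask).getD (i + m + (cs.length + 1)) 0
            - (prefixSums mask).getD (i + m) 0 = ((cs.length + 1 : Nat) : Int)
      · rw [if_pos (hspan.mpr hc), if_pos hc]
        exact ih (i + m + (cs.length + 1)) (count + 1) (by omega) (by omega)
      · rw [if_neg (fun hs => hc (hspan.mp hs)), if_neg hc]
        exact ih (i + m + (cs.length + 1)) count (by omega) (by omega)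

-- ===== VERDICT (by name: the statement is the Claim_ definition above) =====
theorem count_literal_token_spec : Claim_equal_count_literal_token := by
  intro text token mask _
  unfold Spec_count_literal_token count_literal_token count_literal_token_alt
  cases h : token.toList with
  | nil => simp
  | cons c cs =>
      simp only [reduceCtorEq, if_false]
      exact loop_main text.toList c cs mask (text.toList.length + 1) 0 0
        (Nat.zero_le _) (by omega)
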